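-- pv_equiv track=rewrite | github.com/ayaDahbour/Courses | crypto/TEAencr.py | image_to_int_blocks
-- ===== SOURCE A (Python) =====
-- def image_to_int_blocks(image_data):
--     image_blocks = []
--     for i in range(0, len(image_data), 2):
--         if i + 1 < len(image_data):
--             block = (image_data[i], image_data[i + 1])
--         else:
--             block = (image_data[i], 0)
--         image_blocks.append(block)
--     return image_blocks
-- ===== SOURCE B (Python) =====
-- def image_to_int_blocks(image_data):
--     # Pad once, then pair the items by pulling two at a time from one iterator.
--     data = list(image_data)
--     if len(data) % 2 == 1:
--         data.append(0)
--     it = iter(data)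
--     return list(zip(it, it))
-- ===== Notes on version B (the rewrite author's own statement) =====
-- stated objective: idiomatic
-- what changed: Replaces the index loop with a per-iteration padding branch by normalizing the length once (append a single 0 if odd) and then pairing elements with the standard zip-over-one-iterator idiom.
import Mathlib
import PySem

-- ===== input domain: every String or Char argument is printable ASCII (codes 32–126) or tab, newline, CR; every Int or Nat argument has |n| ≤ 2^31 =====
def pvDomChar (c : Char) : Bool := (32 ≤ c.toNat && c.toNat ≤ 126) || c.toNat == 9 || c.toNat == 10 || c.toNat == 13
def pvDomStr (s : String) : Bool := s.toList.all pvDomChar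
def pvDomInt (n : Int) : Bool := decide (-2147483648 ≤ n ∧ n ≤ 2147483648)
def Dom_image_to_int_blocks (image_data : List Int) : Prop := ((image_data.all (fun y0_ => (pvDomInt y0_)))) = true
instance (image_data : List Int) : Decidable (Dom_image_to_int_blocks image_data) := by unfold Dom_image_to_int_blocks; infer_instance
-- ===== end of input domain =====

-- B pads the list once (append one 0 if the length is odd) and then pairs elements
-- two-at-a-time (zip over a single iterator), instead of A's index loop with a
-- per-iteration padding branch; same O(n) cost, plainer decomposition.

-- ===== PORT A =====
def image_to_int_blocks (image_data : List Int) : List (Int × Int) :=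
  (PySem.List.pyRange 0 (image_data.length : Int) 2).foldl
    (fun image_blocks i =>
      let block :=
        if i + 1 < (image_data.length : Int) then
          (PySem.List.pyGetD image_data i 0, PySem.List.pyGetD image_data (i + 1) 0)
        else
          (PySem.List.pyGetD image_data i 0, 0)
      image_blocks ++ [block])
    []

-- ===== PORT B =====
-- exact port of Source B's `list(zip(it, it))` over one iterator: consume two elements per step
def pvPairUp : List Int → List (Int × Int)
  | a :: b :: t => (a, b) :: pvPairUp t
  | _ => []

def image_to_int_blocks_alt (image_data : List Int) : List (Int × Int) :=
  let data := if image_data.length % 2 == 1 then image_data ++ [0] else image_data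
  pvPairUp data

-- ===== PRECONDITION & SPEC =====
def Spec_image_to_int_blocks (image_data : List Int) (out : List (Int × Int)) : Prop := out = image_to_int_blocks_alt image_data
instance (image_data : List Int) (out : List (Int × Int)) : Decidable (Spec_image_to_int_blocks image_data out) := by unfold Spec_image_to_int_blocks; infer_instance

-- ===== CLAIM (what is proved, stated in full; the proofs are below) =====
def Claim_equal_image_to_int_blocks : Prop := ∀ (image_data : List Int), Dom_image_to_int_blocks image_data → Spec_image_to_int_blocks image_data (image_to_int_blocks image_data)

-- ===== LEMMAS AND PROOFS =====

-- reference chunking: exactly "pairs with a trailing 0 for a leftover element"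
def pvChunk : List Int → List (Int × Int)
  | [] => []
  | [a] => [(a, 0)]
  | a :: b :: t => (a, b) :: pvChunk t

theorem pyRange_two_nil (a b : Int) (h : b ≤ a) : PySem.List.pyRange a b 2 = [] := by
  simp [PySem.List.pyRange]
  omega

theorem pyRange_two_cons (a b : Int) (h : a < b) :
    PySem.List.pyRange a b 2 = a :: PySem.List.pyRange (a + 2) b 2 := by
  simp only [PySem.List.pyRange, show (0:Int) < 2 by norm_num, if_true, if_pos h]
  have hc : ((b - a + 2 - 1) / 2).toNat
      = (if a + 2 < b then ((b - (a + 2) + 2 - 1) / 2).toNat else 0) + 1 := by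
    split_ifs <;> omega
  rw [hc, List.range_succ_eq_map]
  simp only [List.map_cons, List.map_map, Nat.cast_zero, mul_zero, add_zero]
  refine congrArg (a :: ·) (List.map_congr_left ?_)
  intro k _
  simp only [Function.comp_apply]
  push_cast
  ring

theorem alt_eq_chunk (xs : List Int) : image_to_int_blocks_alt xs = pvChunk xs := by
  induction xs using pvChunk.induct with
  | case1 => simp [image_to_int_blocks_alt, pvPairUp, pvChunk]
  | case2 a => simp [image_to_int_blocks_alt, pvPairUp, pvChunk]
  | case3 a b t ih =>
    simp only [image_to_int_blocks_alt, List.length_cons] at ih ⊢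
    have h2 : (t.length + 1 + 1) % 2 = t.length % 2 := by omega
    simp only [h2]
    by_cases h : t.length % 2 = 1 <;>
      simp [h, pvPairUp, pvChunk] at ih ⊢ <;> exact ih

theorem a_loop (xs : List Int) : ∀ (t : List Int) (i : Nat) (acc : List (Int × Int)),
    xs.drop i = t →
    (PySem.List.pyRange (i : Int) (xs.length : Int) 2).foldl
      (fun image_blocks j =>
        let block :=
          if j + 1 < (xs.length : Int) then
            (PySem.List.pyGetD xs j 0, PySem.List.pyGetD xs (j + 1) 0)
          else
            (PySem.List.pyGetD xs j 0, 0)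
        image_blocks ++ [block]) acc = acc ++ pvChunk t := by
  intro t
  induction t using pvChunk.induct with
  | case1 =>
    intro i acc hd
    have : xs.length ≤ i := by
      by_contra h
      have := List.drop_eq_nil_iff.mp hd
      omega
    rw [pyRange_two_nil _ _ (by exact_mod_cast this)]
    simp [pvChunk]
  | case2 a =>
    intro i acc hd
    have hlen : xs.length = i + 1 := by
      have := congrArg List.length hd
      simp at this
      omega
    have hi : (i : Int) < (xs.length : Int) := by exact_mod_cast by omega
    rw [pyRange_two_cons _ _ hi]
    have hget : xs[i]? = some a := by
      have : (xs.drop i)[0]? = some a := by rw [hd]; rfl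
      simpa using this
    simp only [List.foldl_cons]
    rw [pyRange_two_nil _ _ (by exact_mod_cast by omega : (xs.length : Int) ≤ (i : Int) + 2)]
    have hcond : ¬ ((i : Int) + 1 < (xs.length : Int)) := by exact_mod_cast by omega
    have hga' : PySem.List.pyGetD xs (i : Int) 0 = a := by
      rw [PySem.List.pyGetD_of_nonneg xs 0 (by positivity)]
      simp [List.getD, hget]
    simp [hcond, hga', pvChunk]
  | case3 a b t ih =>
    intro i acc hd
    have hlen : i + 2 ≤ xs.length := by
      have := congrArg List.length hd
      simp at this
      omega
    have hi : (i : Int) < (xs.length : Int) := by exact_mod_cast by omega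
    rw [pyRange_two_cons _ _ hi]
    have hga : xs[i]? = some a := by
      have : (xs.drop i)[0]? = some a := by rw [hd]; rfl
      simpa using this
    have hgb : xs[i+1]? = some b := by
      have : (xs.drop i)[1]? = some b := by rw [hd]; rfl
      simpa using this
    have hdrop : xs.drop (i + 2) = t := by
      have : (xs.drop i).drop 2 = t := by rw [hd]; rfl
      simpa [List.drop_drop] using this
    have hcond : ((i : Int) + 1 < (xs.length : Int)) := by exact_mod_cast by omega
    have hga' : PySem.List.pyGetD xs (i : Int) 0 = a := by
      rw [PySem.List.pyGetD_of_nonneg xs 0 (by positivity)]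
      simp [List.getD, hga]
    have hgb' : PySem.List.pyGetD xs ((i : Int) + 1) 0 = b := by
      rw [PySem.List.pyGetD_of_nonneg xs 0 (by positivity)]
      have : ((i : Int) + 1).toNat = i + 1 := by omega
      rw [this]
      simp [List.getD, hgb]
    simp only [List.foldl_cons]
    have h2 : ((i : Int) + 2) = ((i + 2 : Nat) : Int) := by push_cast; ring
    rw [h2, ih (i + 2) _ hdrop]
    simp [hcond, hga', hgb', pvChunk]

-- ===== VERDICT (by name: the statement is the Claim_ definition above) =====
theorem image_to_int_blocks_spec : Claim_equal_image_to_int_blocks := by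
  intro xs _
  unfold Spec_image_to_int_blocks
  rw [alt_eq_chunk]
  have := a_loop xs xs 0 [] (by simp)
  simpa [image_to_int_blocks] using this
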